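-- pv_equiv track=rewrite | github.com/RemiErr/2026-python | weeks/week-07/solutions/1111405012/question-10170-su.py | people_on_day
-- ===== SOURCE A (Python) =====
-- import math
--
-- def people_on_day(s: int, d: int) -> int:
--     target = (s - 1) * s + 2 * d
--     n = (math.isqrt(1 + 4 * target) - 1) // 2
--     if n < s:
--         n = s
--     while n * (n + 1) < target:
--         n += 1
--     return n
-- ===== SOURCE B (Python) =====
-- def people_on_day(s: int, d: int) -> int:
--     target = (s - 1) * s + 2 * d
--     lo = s if s > 0 else 0
--     hi = lo if lo > target else target
--     while lo < hi:
--         mid = (lo + hi) // 2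
--         if mid * (mid + 1) < target:
--             lo = mid + 1
--         else:
--             hi = mid
--     return lo
-- ===== Notes on version B (the rewrite author's own statement) =====
-- stated objective: alternative
-- what changed: Replaces the math.isqrt closed-form seed plus increment fix-up loop by a direct binary search for the least n >= max(s,0) with n*(n+1) >= target, bracketed by [max(s,0), max(max(s,0),target)].
import Mathlib
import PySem

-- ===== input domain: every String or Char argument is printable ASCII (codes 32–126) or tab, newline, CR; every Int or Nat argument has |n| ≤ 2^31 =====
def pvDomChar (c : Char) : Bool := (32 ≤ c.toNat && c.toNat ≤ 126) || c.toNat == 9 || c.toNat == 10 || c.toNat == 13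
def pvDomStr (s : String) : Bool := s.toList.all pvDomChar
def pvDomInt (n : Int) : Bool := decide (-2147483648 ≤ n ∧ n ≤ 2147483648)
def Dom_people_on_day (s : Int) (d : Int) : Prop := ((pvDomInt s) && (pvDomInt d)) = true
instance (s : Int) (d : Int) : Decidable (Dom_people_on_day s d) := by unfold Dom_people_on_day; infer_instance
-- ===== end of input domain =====

-- B replaces A's math.isqrt closed-form seed (plus fix-up increment loop) by a plain
-- binary search for the least n ≥ max(s,0) with n*(n+1) ≥ target; equal cost, no isqrt.

-- ===== PORT A =====
-- A's `while n * (n + 1) < target: n += 1` loop.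
def pvLoopA (t n : Int) : Int :=
  if h : n * (n + 1) < t then pvLoopA t (n + 1) else n
termination_by (t + 1 - n).toNat
decreasing_by
  have hn : n ≤ t := by
    by_cases hc : n ≤ 0
    · nlinarith
    · nlinarith
  omega

-- math.isqrt raises ValueError on a negative argument; Pre_ excludes 1 + 4*target < 0,
-- where the `.toNat` below would be inexact.
def people_on_day (s : Int) (d : Int) : Int :=
  let target := (s - 1) * s + 2 * d
  let n := PySem.Int.floordiv ((Nat.sqrt (1 + 4 * target).toNat : Int) - 1) 2
  let n' := if n < s then s else n
  pvLoopA target n'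

-- ===== PORT B =====
-- B's `while lo < hi: …` binary-search loop.
-- Python's `mid = (lo + hi) // 2` is written inline (twice) to keep the recursion let-free.
def pvLoopB (t lo hi : Int) : Int :=
  if hlt : lo < hi then
    if PySem.Int.floordiv (lo + hi) 2 * (PySem.Int.floordiv (lo + hi) 2 + 1) < t then
      pvLoopB t (PySem.Int.floordiv (lo + hi) 2 + 1) hi
    else
      pvLoopB t lo (PySem.Int.floordiv (lo + hi) 2)
  else lo
termination_by (hi - lo).toNat
decreasing_by
  · have hb := PySem.Int.floordiv_two_mid_bounds  (le_of_lt hlt)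
    omega
  · have hb : PySem.Int.floordiv (lo + hi) 2 < hi := by
      rw [PySem.Int.floordiv_lt_iff_lt_mul (by norm_num)]
      omega
    omega

def people_on_day_alt (s : Int) (d : Int) : Int :=
  let target := (s - 1) * s + 2 * d
  let lo := if s > 0 then s else 0
  let hi := if lo > target then lo else target
  pvLoopB target lo hi

-- ===== PRECONDITION & SPEC =====
-- Pre_ excludes exactly the inputs on which math.isqrt receives a negative argument and A raises ValueError.
def Pre_people_on_day (s : Int) (d : Int) : Prop := 0 ≤ 1 + 4 * ((s - 1) * s + 2 * d)
instance (s : Int) (d : Int) : Decidable (Pre_people_on_day s d) := by unfold Pre_people_on_day; infer_instance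
def pvWitness_people_on_day : Int × Int := (1, 1)

def Spec_people_on_day (s : Int) (d : Int) (out : Int) : Prop := out = people_on_day_alt s d
instance (s : Int) (d : Int) (out : Int) : Decidable (Spec_people_on_day s d out) := by unfold Spec_people_on_day; infer_instance

-- ===== CLAIM (what is proved, stated in full; the proofs are below) =====
def Claim_equal_people_on_day : Prop := ∀ (s : Int) (d : Int), Dom_people_on_day s d → Pre_people_on_day s d → Spec_people_on_day s d (people_on_day s d)

-- ===== LEMMAS AND PROOFS =====

-- A's loop returns the least m ≥ n with t ≤ m*(m+1).
theorem pvLoopA_props (t n : Int) :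
    n ≤ pvLoopA t n ∧ t ≤ pvLoopA t n * (pvLoopA t n + 1) ∧
      ∀ k, n ≤ k → k < pvLoopA t n → k * (k + 1) < t := by
  induction n using pvLoopA.induct (t := t) with
  | case1 n h ih =>
    rw [pvLoopA, dif_pos h]
    refine ⟨by omega, ih.2.1, ?_⟩
    intro k hk1 hk2
    rcases eq_or_lt_of_le hk1 with rfl | hlt
    · exact h
    · exact ih.2.2 k (by omega) hk2
  | case2 n h =>
    rw [pvLoopA, dif_neg h]
    exact ⟨le_refl n, by omega, by omega⟩

-- B's binary search returns the least m ≥ lo with t ≤ m*(m+1), given a valid bracket.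
theorem pvLoopB_props (t lo hi : Int) (h0 : 0 ≤ lo) (hle : lo ≤ hi) (hhi : t ≤ hi * (hi + 1)) :
    lo ≤ pvLoopB t lo hi ∧ t ≤ pvLoopB t lo hi * (pvLoopB t lo hi + 1) ∧
      ∀ k, lo ≤ k → k < pvLoopB t lo hi → k * (k + 1) < t := by
  induction lo, hi using pvLoopB.induct (t := t) with
  | case1 lo hi hlt hcond ih =>
    have hb := PySem.Int.floordiv_two_mid_bounds (le_of_lt hlt)
    have hmlt : PySem.Int.floordiv (lo + hi) 2 < hi := by
      rw [PySem.Int.floordiv_lt_iff_lt_mul (by norm_num)]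
      omega
    rw [pvLoopB, dif_pos hlt, if_pos hcond]
    obtain ⟨i1, i2, i3⟩ := ih (by omega) (by omega) hhi
    refine ⟨by omega, i2, ?_⟩
    intro k hk1 hk2
    by_cases hkm : k ≤ PySem.Int.floordiv (lo + hi) 2
    · nlinarith
    · exact i3 k (by omega) hk2
  | case2 lo hi hlt hcond ih =>
    have hb := PySem.Int.floordiv_two_mid_bounds (le_of_lt hlt)
    have hP : t ≤ PySem.Int.floordiv (lo + hi) 2 * (PySem.Int.floordiv (lo + hi) 2 + 1) :=
      le_of_not_gt hcond
    rw [pvLoopB, dif_pos hlt, if_neg hcond]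
    exact ih h0 hb.1 hP
  | case3 lo hi hlt =>
    rw [pvLoopB, dif_neg hlt]
    have : lo = hi := le_antisymm hle (by omega)
    subst this
    exact ⟨le_refl lo, hhi, by omega⟩

-- least element is unique
theorem pv_least_unique (t lo r1 r2 : Int)
    (h1 : lo ≤ r1 ∧ t ≤ r1 * (r1 + 1) ∧ ∀ k, lo ≤ k → k < r1 → k * (k + 1) < t)
    (h2 : lo ≤ r2 ∧ t ≤ r2 * (r2 + 1) ∧ ∀ k, lo ≤ k → k < r2 → k * (k + 1) < t) : r1 = r2 := by
  rcases lt_trichotomy r1 r2 with h | h | h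
  · have := h2.2.2 r1 h1.1 h
    linarith [h1.2.1]
  · exact h
  · have := h1.2.2 r2 h2.1 h
    linarith [h2.2.1]

-- the isqrt seed is a nonnegative n0 with n0*(n0+1) ≤ t
theorem pv_n0_fact (t : Int) (ht : 0 ≤ t) :
    0 ≤ PySem.Int.floordiv ((Nat.sqrt (1 + 4 * t).toNat : Int) - 1) 2 ∧
      PySem.Int.floordiv ((Nat.sqrt (1 + 4 * t).toNat : Int) - 1) 2 *
        (PySem.Int.floordiv ((Nat.sqrt (1 + 4 * t).toNat : Int) - 1) 2 + 1) ≤ t := by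
  set m := (1 + 4 * t).toNat with hmdef
  have hm : (m : Int) = 1 + 4 * t := Int.toNat_of_nonneg (by omega)
  set r := Nat.sqrt m with hrdef
  have h1 : r ^ 2 ≤ m := Nat.sqrt_le' m
  have h2 : m < (r + 1) ^ 2 := Nat.lt_succ_sqrt' m
  have hr1 : 1 ≤ r := by
    by_contra hc
    push_neg at hc
    have hr0 : r = 0 := by omega
    rw [hr0] at h2
    norm_num at h2
    omega
  rw [PySem.Int.floordiv_eq_ediv_of_pos (by norm_num)]
  set n0 := ((r : Int) - 1) / 2 with hn0
  have hkey : 2 * n0 + 1 ≤ (r : Int) ∧ (r : Int) ≤ 2 * n0 + 2 ∧ 0 ≤ n0 := by omega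
  have h1' : (r : Int) ^ 2 ≤ (m : Int) := by exact_mod_cast h1
  constructor
  · exact hkey.2.2
  · nlinarith [hkey.1, hkey.2.2, h1', hm]

theorem people_on_day_spec : Claim_equal_people_on_day := by
  intro s d hdom hpre
  unfold Spec_people_on_day
  unfold Pre_people_on_day at hpre
  set t := (s - 1) * s + 2 * d with htdef
  have ht : 0 ≤ t := by omega
  -- names
  set n0 := PySem.Int.floordiv ((Nat.sqrt (1 + 4 * t).toNat : Int) - 1) 2 with hn0def
  obtain ⟨hn0nn, hn0le⟩ := pv_n0_fact t ht
  set a0 := if n0 < s then s else n0 with ha0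
  set lo := if s > 0 then s else 0 with hlo
  set hi := if lo > t then lo else t with hhi
  have hA : people_on_day s d = pvLoopA t a0 := by
    simp only [people_on_day, ← htdef, ← hn0def, ← ha0]
  have hB : people_on_day_alt s d = pvLoopB t lo hi := by
    simp only [people_on_day_alt, ← htdef, ← hlo, ← hhi]
  rw [hA, hB]
  have hlonn : 0 ≤ lo := by rw [hlo]; split <;> omega
  have hlohi : lo ≤ hi := by rw [hhi]; split <;> omega
  have hhit : t ≤ hi := by rw [hhi]; split <;> omega
  have hhinn : 0 ≤ hi := le_trans hlonn hlohi
  have hhiP : t ≤ hi * (hi + 1) := by nlinarith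
  have hBprops := pvLoopB_props t lo hi hlonn hlohi hhiP
  have hAprops := pvLoopA_props t a0
  -- upgrade A's props from lower bound a0 to lower bound lo
  have hloa0 : lo ≤ a0 := by
    rw [ha0, hlo]; split <;> split <;> omega
  have hApropsLo : lo ≤ pvLoopA t a0 ∧ t ≤ pvLoopA t a0 * (pvLoopA t a0 + 1) ∧
      ∀ k, lo ≤ k → k < pvLoopA t a0 → k * (k + 1) < t := by
    refine ⟨le_trans hloa0 hAprops.1, hAprops.2.1, ?_⟩
    intro k hk1 hk2
    by_cases hka' : a0 ≤ k
    case pos =>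
      exact hAprops.2.2 k hka' hk2
    case neg =>
      have hka : k < a0 := by omega
      -- k < a0; then a0 = n0 (else interval empty), and k*(k+1) < n0*(n0+1) ≤ t
      have hk0 : 0 ≤ k := le_trans hlonn hk1
      have hkn0 : k < n0 := by
        rw [ha0] at hka
        by_cases hc : n0 < s
        · rw [if_pos hc] at hka
          rw [hlo] at hk1
          split at hk1 <;> omega
        · rwa [if_neg hc] at hka
      nlinarith
  exact pv_least_unique t lo (pvLoopA t a0) (pvLoopB t lo hi) hApropsLo hBprops
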